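-- pv_equiv track=rewrite | github.com/alastergrume/AcademyTOP | Блок №2 Python_START/ForDownloade/Не загруженные/2024_02_15_Python_DZ_Modul__04_Stroki_cpiski.py | summator_plus
-- ===== SOURCE A (Python) =====
-- def summator_plus(ls_1, ls_2):
--     list_sum_3 = []
--     for i in ls_1:
--         for j in ls_2:
--             if j == i:
--                 list_sum_3.append(j)
--                 list_sum_3.append(i)
--     return sorted(list_sum_3)
--
--
--     return f'Объединение списков c общими элементами:\n{list_sum}\n'
-- ===== SOURCE B (Python) =====
-- def summator_plus(ls_1, ls_2):
--     c1 = {}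
--     for v in ls_1:
--         c1[v] = c1.get(v, 0) + 1
--     c2 = {}
--     for v in ls_2:
--         c2[v] = c2.get(v, 0) + 1
--     res = []
--     for v in sorted(c1):
--         if v in c2:
--             res += [v] * (2 * c1[v] * c2[v])
--     return res
-- ===== Notes on version B (the rewrite author's own statement) =====
-- stated objective: faster
-- what changed: Replaces the O(n*m) nested scan plus final sort with two frequency dicts and a single pass over the sorted distinct keys of the first, emitting 2*c1[v]*c2[v] copies of each common value (already in order, so no final sort of the big list).
import Mathlib
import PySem

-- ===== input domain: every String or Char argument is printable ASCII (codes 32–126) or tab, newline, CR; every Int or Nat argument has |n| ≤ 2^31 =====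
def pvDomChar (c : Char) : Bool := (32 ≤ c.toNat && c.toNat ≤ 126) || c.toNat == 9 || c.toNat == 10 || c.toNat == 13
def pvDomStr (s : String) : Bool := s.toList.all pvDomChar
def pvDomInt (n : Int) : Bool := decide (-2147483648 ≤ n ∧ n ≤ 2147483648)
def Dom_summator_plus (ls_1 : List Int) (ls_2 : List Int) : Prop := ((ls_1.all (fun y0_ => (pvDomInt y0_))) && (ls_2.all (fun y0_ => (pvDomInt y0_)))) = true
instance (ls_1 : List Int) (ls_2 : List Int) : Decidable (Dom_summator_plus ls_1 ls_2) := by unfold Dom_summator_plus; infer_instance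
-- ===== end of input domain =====

-- B replaces A's O(n*m) nested scan + final sort with two frequency dicts and one pass
-- over the sorted distinct keys of the first dict (2*c1[v]*c2[v] copies per common value v).

-- ===== PORT A =====
def summator_plus (ls_1 : List Int) (ls_2 : List Int) : List Int :=
  let list_sum_3 :=
    ls_1.foldl (fun acc i =>
      ls_2.foldl (fun acc2 j =>
        if j == i then acc2 ++ [j] ++ [i] else acc2) acc) []
  PySem.List.sorted list_sum_3 (fun x => x) false

-- ===== PORT B =====
def summator_plus_alt (ls_1 : List Int) (ls_2 : List Int) : List Int :=
  let c1 := ls_1.foldl (fun d v => d.insert v (d.getD v 0 + 1)) (PySem.Dict.empty : PySem.Dict Int Int)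
  let c2 := ls_2.foldl (fun d v => d.insert v (d.getD v 0 + 1)) (PySem.Dict.empty : PySem.Dict Int Int)
  (PySem.List.sorted c1.keys (fun x => x) false).foldl (fun res v =>
    if c2.contains v then res ++ List.replicate (2 * c1.getD v 0 * c2.getD v 0).toNat v
    else res) []

-- ===== PRECONDITION & SPEC =====
def Spec_summator_plus (ls_1 : List Int) (ls_2 : List Int) (out : List Int) : Prop := out = summator_plus_alt ls_1 ls_2
instance (ls_1 : List Int) (ls_2 : List Int) (out : List Int) : Decidable (Spec_summator_plus ls_1 ls_2 out) := by unfold Spec_summator_plus; infer_instance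

-- ===== CLAIM (what is proved, stated in full; the proofs are below) =====
def Claim_equal_summator_plus : Prop := ∀ (ls_1 : List Int) (ls_2 : List Int), Dom_summator_plus ls_1 ls_2 → Spec_summator_plus ls_1 ls_2 (summator_plus ls_1 ls_2)

-- ===== LEMMAS AND PROOFS =====

-- one matched pair (j = i) of A's inner loop
def gA (i j : Int) : List Int := if j == i then [j, i] else []

-- B's contribution for one distinct value v
def hB (ls_1 ls_2 : List Int) (v : Int) : List Int :=
  if ls_2.contains v then List.replicate (2 * ls_1.count v * ls_2.count v) v else []

theorem mem_hB {ls_1 ls_2 : List Int} {v x : Int} (h : x ∈ hB ls_1 ls_2 v) : x = v := by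
  unfold hB at h
  split at h
  · exact List.eq_of_mem_replicate h
  · simp at h

theorem summator_plus_eq (ls_1 ls_2 : List Int) :
    summator_plus ls_1 ls_2
      = PySem.List.sorted (ls_1.flatMap (fun i => ls_2.flatMap (gA i))) (fun x => x) false := by
  unfold summator_plus
  have hinner : (fun (acc : List Int) (i : Int) =>
      ls_2.foldl (fun acc2 j => if j == i then acc2 ++ [j] ++ [i] else acc2) acc)
      = fun acc i => acc ++ ls_2.flatMap (gA i) := by
    funext acc i
    have hf : (fun (acc2 : List Int) (j : Int) => if j == i then acc2 ++ [j] ++ [i] else acc2)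
        = fun acc2 j => acc2 ++ gA i j := by
      funext a j
      unfold gA
      split <;> simp
    rw [hf, PySem.List.foldl_append_eq_flatMap]
  rw [hinner, PySem.List.foldl_append_eq_flatMap]
  simp

theorem summator_plus_alt_eq (ls_1 ls_2 : List Int) :
    summator_plus_alt ls_1 ls_2
      = (PySem.List.sorted (PySem.Set.ofList ls_1) (fun x => x) false).flatMap (hB ls_1 ls_2) := by
  unfold summator_plus_alt
  dsimp only
  rw [PySem.Dict.foldl_insert_getD_add_one_eq_counter, PySem.Dict.foldl_insert_getD_add_one_eq_counter,
      PySem.Dict.keys_counter]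
  have hf : (fun (res : List Int) (v : Int) =>
      if (PySem.Dict.counter ls_2).contains v then
        res ++ List.replicate (2 * (PySem.Dict.counter ls_1).getD v 0 * (PySem.Dict.counter ls_2).getD v 0).toNat v
      else res)
      = fun res v => res ++ hB ls_1 ls_2 v := by
    funext res v
    unfold hB
    rw [PySem.Dict.contains_counter, PySem.Dict.getD_counter, PySem.Dict.getD_counter]
    have hc : (2 * (ls_1.count v : Int) * (ls_2.count v : Int)).toNat
        = 2 * ls_1.count v * ls_2.count v := by
      have : (2 * (ls_1.count v : Int) * (ls_2.count v : Int))
          = ((2 * ls_1.count v * ls_2.count v : Nat) : Int) := by push_cast; ring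
      rw [this, Int.toNat_natCast]
    split <;> simp [hc]
  rw [hf, PySem.List.foldl_append_eq_flatMap]
  simp

theorem count_inner (ls_2 : List Int) (i a : Int) :
    ((ls_2.flatMap (gA i)).count a) = if i = a then 2 * ls_2.count a else 0 := by
  induction ls_2 with
  | nil => simp
  | cons j t ih =>
    rw [List.flatMap_cons, List.count_append, ih]
    unfold gA
    by_cases hji : j = i
    · subst hji
      by_cases hja : j = a
      · subst hja
        simp
        ring
      · simp [hja]
    · have : (j == i) = false := by simp [hji]
      rw [this]
      by_cases hja : j = a
      · subst hja
        simp [Ne.symm hji]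
      · simp [hja]

theorem count_A_list (ls_1 ls_2 : List Int) (a : Int) :
    ((ls_1.flatMap (fun i => ls_2.flatMap (gA i))).count a) = 2 * ls_1.count a * ls_2.count a := by
  induction ls_1 with
  | nil => simp
  | cons i t ih =>
    rw [List.flatMap_cons, List.count_append, count_inner, ih]
    by_cases hia : i = a
    · subst hia
      simp
      ring
    · simp [hia]

theorem count_flatMap_hB (ls_1 ls_2 : List Int) (S : List Int) (hnd : S.Nodup) (a : Int) :
    ((S.flatMap (hB ls_1 ls_2)).count a) = if a ∈ S then (hB ls_1 ls_2 a).count a else 0 := by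
  induction S with
  | nil => simp
  | cons v t ih =>
    rw [List.flatMap_cons, List.count_append, ih (List.Nodup.of_cons hnd)]
    by_cases hva : v = a
    · subst hva
      have hnot : v ∉ t := (List.nodup_cons.mp hnd).1
      simp [hnot]
    · have h0 : (hB ls_1 ls_2 v).count a = 0 := by
        rw [List.count_eq_zero]
        intro hmem
        exact hva ((mem_hB hmem).symm)
      rw [h0]
      simp [List.mem_cons, Ne.symm hva]

theorem count_hB_self (ls_1 ls_2 : List Int) (a : Int) :
    (hB ls_1 ls_2 a).count a = if ls_2.contains a then 2 * ls_1.count a * ls_2.count a else 0 := by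
  unfold hB
  split <;> simp

-- ===== VERDICT (by name: the statement is the Claim_ definition above) =====
theorem summator_plus_spec : Claim_equal_summator_plus := by
  unfold Claim_equal_summator_plus
  intro ls_1 ls_2 _
  unfold Spec_summator_plus
  rw [summator_plus_eq, summator_plus_alt_eq]
  have hpwS : (PySem.List.sorted (PySem.Set.ofList ls_1) (fun x => x) false).Pairwise (· < ·) :=
    PySem.List.sorted_ofList_pairwise_lt ls_1
  have hndS : (PySem.List.sorted (PySem.Set.ofList ls_1) (fun x => x) false).Nodup :=
    hpwS.imp (fun h => ne_of_lt h)
  apply PySem.List.sorted_id_eq_of_perm_of_pairwise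
  · rw [List.perm_iff_count]
    intro a
    rw [count_flatMap_hB _ _ _ hndS, count_A_list]
    by_cases hmem : a ∈ ls_1
    · have : a ∈ PySem.List.sorted (PySem.Set.ofList ls_1) (fun x => x) false := by
        rw [PySem.List.mem_sorted, PySem.Set.mem_ofList]; exact hmem
      rw [if_pos this, count_hB_self]
      by_cases h2 : a ∈ ls_2
      · simp [h2]
      · have : ls_2.count a = 0 := List.count_eq_zero.mpr h2
        simp [h2, this]
    · have : a ∉ PySem.List.sorted (PySem.Set.ofList ls_1) (fun x => x) false := by
        rw [PySem.List.mem_sorted, PySem.Set.mem_ofList]; exact hmem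
      have hc0 : ls_1.count a = 0 := List.count_eq_zero.mpr hmem
      simp [this, hc0]
  · rw [List.flatMap_def, List.pairwise_flatten]
    constructor
    · intro l hl
      rw [List.mem_map] at hl
      obtain ⟨v, _, rfl⟩ := hl
      unfold hB
      split
      · exact (List.pairwise_replicate).mpr (Or.inr le_rfl)
      · exact List.Pairwise.nil
    · rw [List.pairwise_map]
      refine hpwS.imp ?_
      intro u w huw x hx y hy
      rw [mem_hB hx, mem_hB hy]
      exact le_of_lt huw
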